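-- pv_equiv track=rewrite | github.com/lambdapro/agentic-stlc-kane-hyperexecute | astlc/chat_reporter.py | confidence_detail
-- ===== SOURCE A (Python) =====
-- def confidence_detail(scenarios: list[dict]) -> str:
--     lines = ["## Confidence Analysis", ""]
--     groups: dict[str, list[dict]] = {"HIGH": [], "MEDIUM": [], "LOW": []}
--     for sc in scenarios:
--         lvl = sc.get("confidence_level", "MEDIUM")
--         groups.setdefault(lvl, []).append(sc)
--
--     for level in ("HIGH", "MEDIUM", "LOW"):
--         items = groups.get(level, [])
--         if not items:
--             continue
--         lines.append(f"### {level} confidence — {len(items)} scenario(s)")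
--         for sc in items:
--             reason = sc.get("confidence_reason", "")
--             desc   = sc.get("description", "")[:80]
--             entry  = f"- **{sc['id']}**: {desc}"
--             if reason:
--                 entry += f"  \n  _{reason}_"
--             lines.append(entry)
--         lines.append("")
--
--     return "\n".join(lines)
-- ===== SOURCE B (Python) =====
-- def confidence_detail(scenarios: list[dict]) -> str:
--     def fmt(sc):
--         entry = f"- **{sc['id']}**: {sc.get('description', '')[:80]}"
--         reason = sc.get("confidence_reason", "")
--         return entry + (f"  \n  _{reason}_" if reason else "")
--
--     out = ["## Confidence Analysis", ""]
--     for level in ("HIGH", "MEDIUM", "LOW"):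
--         items = [sc for sc in scenarios if sc.get("confidence_level", "MEDIUM") == level]
--         if items:
--             out.append(f"### {level} confidence — {len(items)} scenario(s)")
--             out.extend(fmt(sc) for sc in items)
--             out.append("")
--     return "\n".join(out)
-- ===== Notes on version B (the rewrite author's own statement) =====
-- stated objective: simpler
-- what changed: Drops the intermediate groups dict and its setdefault/append pass: B filters the scenario list afresh for each of the three fixed levels and emits entries via a comprehension and a fmt helper.
import Mathlib
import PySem

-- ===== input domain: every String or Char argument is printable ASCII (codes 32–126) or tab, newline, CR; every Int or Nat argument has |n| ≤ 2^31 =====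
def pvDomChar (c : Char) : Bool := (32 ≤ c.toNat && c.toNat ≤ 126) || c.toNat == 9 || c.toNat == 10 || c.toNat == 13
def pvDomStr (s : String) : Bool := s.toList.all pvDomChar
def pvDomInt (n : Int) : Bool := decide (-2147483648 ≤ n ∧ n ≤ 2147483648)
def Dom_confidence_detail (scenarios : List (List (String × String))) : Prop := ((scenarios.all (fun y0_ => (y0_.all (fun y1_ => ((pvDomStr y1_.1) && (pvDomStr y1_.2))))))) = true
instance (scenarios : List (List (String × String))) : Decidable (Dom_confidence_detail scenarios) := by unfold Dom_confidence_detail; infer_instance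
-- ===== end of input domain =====

-- B replaces A's grouping dict (one setdefault/append pass + lookups) by a fresh filter of the
-- scenario list per fixed level — simpler, no intermediate dict; same output, same O(n) cost.

-- ===== PORT A =====
-- sc['id'] raises KeyError when absent; Pre_ guarantees the key is present, so .getD "" is never taken.
def confidence_detail (scenarios : List (List (String × String))) : String :=
  let lines : List String := ["## Confidence Analysis", ""]
  let groups : PySem.Dict String (List (List (String × String))) :=
    PySem.Dict.ofList [("HIGH", []), ("MEDIUM", []), ("LOW", [])]
  -- groups.setdefault(lvl, []).append(sc)  ==  groups[lvl] = groups.get(lvl, []) + [sc]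
  let groups := scenarios.foldl (fun g sc =>
    g.modify ((PySem.Dict.mk sc).getD "confidence_level" "MEDIUM") [] (· ++ [sc])) groups
  let lines := ["HIGH", "MEDIUM", "LOW"].foldl (fun lines level =>
    let items := groups.getD level []
    if items = [] then lines
    else
      let lines := lines ++ ["### " ++ level ++ " confidence — " ++ PySem.Int.toStr (items.length : Int) ++ " scenario(s)"]
      let lines := items.foldl (fun lines sc =>
        let reason := (PySem.Dict.mk sc).getD "confidence_reason" ""
        let desc := PySem.Str.slice ((PySem.Dict.mk sc).getD "description" "") none (some 80)
        let entry := "- **" ++ ((PySem.Dict.mk sc).get? "id").getD "" ++ "**: " ++ desc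
        let entry := if reason ≠ "" then entry ++ "  \n  _" ++ reason ++ "_" else entry
        lines ++ [entry]) lines
      lines ++ [""]) lines
  PySem.Str.join "\n" lines

-- ===== PORT B =====
def cdFmt (sc : List (String × String)) : String :=
  let entry := "- **" ++ ((PySem.Dict.mk sc).get? "id").getD "" ++ "**: " ++
    PySem.Str.slice ((PySem.Dict.mk sc).getD "description" "") none (some 80)
  let reason := (PySem.Dict.mk sc).getD "confidence_reason" ""
  entry ++ (if reason ≠ "" then "  \n  _" ++ reason ++ "_" else "")

def confidence_detail_alt (scenarios : List (List (String × String))) : String :=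
  let out : List String := ["## Confidence Analysis", ""]
  let out := ["HIGH", "MEDIUM", "LOW"].foldl (fun out level =>
    let items := scenarios.filter (fun sc => (PySem.Dict.mk sc).getD "confidence_level" "MEDIUM" == level)
    if items ≠ [] then
      out ++ ["### " ++ level ++ " confidence — " ++ PySem.Int.toStr (items.length : Int) ++ " scenario(s)"]
          ++ items.map cdFmt ++ [""]
    else out) out
  PySem.Str.join "\n" out

-- ===== PRECONDITION & SPEC =====
-- Pre_ excludes exactly the inputs where A raises KeyError: a scenario without an "id" key whose
-- confidence level is one of the three emitted ones (other levels are never formatted, so no lookup happens).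
def Pre_confidence_detail (scenarios : List (List (String × String))) : Prop :=
  ∀ sc ∈ scenarios,
    (PySem.Dict.mk sc).getD "confidence_level" "MEDIUM" ∈ (["HIGH", "MEDIUM", "LOW"] : List String) →
    (PySem.Dict.mk sc).contains "id" = true
instance (scenarios : List (List (String × String))) : Decidable (Pre_confidence_detail scenarios) := by
  unfold Pre_confidence_detail; infer_instance
def pvWitness_confidence_detail : (List (List (String × String))) :=
  [[("id", "s1"), ("confidence_level", "HIGH")], [("id", "s2"), ("confidence_reason", "ok")]]
def Spec_confidence_detail (scenarios : List (List (String × String))) (out : String) : Prop := out = confidence_detail_alt scenarios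
instance (scenarios : List (List (String × String))) (out : String) : Decidable (Spec_confidence_detail scenarios out) := by unfold Spec_confidence_detail; infer_instance

-- ===== CLAIM (what is proved, stated in full; the proofs are below) =====
def Claim_equal_confidence_detail : Prop := ∀ (scenarios : List (List (String × String))), Dom_confidence_detail scenarios → Pre_confidence_detail scenarios → Spec_confidence_detail scenarios (confidence_detail scenarios)

-- ===== LEMMAS AND PROOFS =====

-- A's grouping pass, read back at any key: initial value plus the matching scenarios in order.
theorem cd_group (l : List (List (String × String)))
    (d : PySem.Dict String (List (List (String × String)))) (c : String) :
    (l.foldl (fun g sc =>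
      g.modify ((PySem.Dict.mk sc).getD "confidence_level" "MEDIUM") [] (· ++ [sc])) d).getD c []
      = d.getD c [] ++ l.filter (fun sc => (PySem.Dict.mk sc).getD "confidence_level" "MEDIUM" == c) := by
  induction l generalizing d with
  | nil => simp
  | cons sc t ih =>
    rw [List.foldl_cons, ih, PySem.Dict.getD_modify, List.filter_cons]
    by_cases hc : (PySem.Dict.mk sc).getD "confidence_level" "MEDIUM" = c
    · simp [hc]
    · simp [hc, Ne.symm hc]

-- A's inner entry loop is exactly a map of cdFmt.
theorem cd_inner (items : List (List (String × String))) (ls : List String) :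
    items.foldl (fun lines sc =>
        let reason := (PySem.Dict.mk sc).getD "confidence_reason" ""
        let desc := PySem.Str.slice ((PySem.Dict.mk sc).getD "description" "") none (some 80)
        let entry := "- **" ++ ((PySem.Dict.mk sc).get? "id").getD "" ++ "**: " ++ desc
        let entry := if reason ≠ "" then entry ++ "  \n  _" ++ reason ++ "_" else entry
        lines ++ [entry]) ls
      = ls ++ items.map cdFmt := by
  have := PySem.List.foldl_append_singleton_eq_map cdFmt items ls
  rw [← this]
  apply PySem.List.foldl_congr_mem
  intro acc sc _
  simp only [cdFmt]
  by_cases hr : (PySem.Dict.mk sc).getD "confidence_reason" "" ≠ ""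
  · simp [hr, String.append_assoc]
  · simp at hr; simp [hr]

theorem cd_init_getD (c : String) (hc : c = "HIGH" ∨ c = "MEDIUM" ∨ c = "LOW") :
    (PySem.Dict.ofList ([("HIGH", []), ("MEDIUM", []), ("LOW", [])] :
        List (String × List (List (String × String))))).getD c [] = [] := by
  rcases hc with h | h | h <;> subst h <;> rfl

-- ===== VERDICT (by name: the statement is the Claim_ definition above) =====
theorem confidence_detail_spec : Claim_equal_confidence_detail := by
  intro scenarios _ _
  show confidence_detail scenarios = confidence_detail_alt scenarios
  unfold confidence_detail confidence_detail_alt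
  simp only [List.foldl_cons, List.foldl_nil, cd_group, cd_inner,
    cd_init_getD _ (Or.inl rfl), cd_init_getD _ (Or.inr (Or.inl rfl)),
    cd_init_getD _ (Or.inr (Or.inr rfl)), List.nil_append]
  set fH := scenarios.filter (fun sc => (PySem.Dict.mk sc).getD "confidence_level" "MEDIUM" == "HIGH")
  set fM := scenarios.filter (fun sc => (PySem.Dict.mk sc).getD "confidence_level" "MEDIUM" == "MEDIUM")
  set fL := scenarios.filter (fun sc => (PySem.Dict.mk sc).getD "confidence_level" "MEDIUM" == "LOW")
  by_cases h1 : fH = [] <;> by_cases h2 : fM = [] <;> by_cases h3 : fL = [] <;>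
    simp [h1, h2, h3]
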